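-- pv_equiv track=rewrite | github.com/joehuergo/Joes-Music-Theory-BS | pset_ops.py | intervals_to_pitches
-- ===== SOURCE A (Python) =====
-- def intervals_to_pitches(iset):
--     perm_pset = []
--     p = 0
--     perm_pset.append(0)
--     for j in iset:
--         p += j
--         perm_pset.append(p)
--     return perm_pset
-- ===== SOURCE B (Python) =====
-- def intervals_to_pitches(iset):
--     xs = list(iset)
--     return [sum(xs[:i]) for i in range(len(xs) + 1)]
-- ===== Notes on version B (the rewrite author's own statement) =====
-- stated objective: alternative
-- what changed: B replaces A's single-pass running accumulator with independent prefix sums: for each i it sums the length-i prefix of the input from scratch via a comprehension over range(len+1).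
import Mathlib
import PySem

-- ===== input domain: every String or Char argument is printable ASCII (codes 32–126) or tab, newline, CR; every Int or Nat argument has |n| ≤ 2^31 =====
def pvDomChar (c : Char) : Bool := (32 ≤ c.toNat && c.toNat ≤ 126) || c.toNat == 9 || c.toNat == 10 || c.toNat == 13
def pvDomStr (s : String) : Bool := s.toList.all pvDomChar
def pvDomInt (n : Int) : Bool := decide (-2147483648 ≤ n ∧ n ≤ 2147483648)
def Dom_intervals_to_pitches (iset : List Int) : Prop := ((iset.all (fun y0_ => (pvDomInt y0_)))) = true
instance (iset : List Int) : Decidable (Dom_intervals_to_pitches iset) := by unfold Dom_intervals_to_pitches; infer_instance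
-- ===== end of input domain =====

-- B replaces A's running accumulator with independent prefix sums (one sum per index); alternative decomposition, not faster.

-- ===== PORT A =====
-- forward loop carrying p: p += j; append p
def intervalsToPitchesGo (p : Int) (iset : List Int) : List Int :=
  match iset with
  | [] => []
  | j :: rest => (p + j) :: intervalsToPitchesGo (p + j) rest

def intervals_to_pitches (iset : List Int) : List Int :=
  0 :: intervalsToPitchesGo 0 iset

-- ===== PORT B =====
-- [sum(xs[:i]) for i in range(len(xs)+1)]
def intervals_to_pitches_alt (iset : List Int) : List Int :=
  (List.range (iset.length + 1)).map (fun i => (iset.take i).sum)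

-- ===== PRECONDITION & SPEC =====
def Spec_intervals_to_pitches (iset : List Int) (out : List Int) : Prop := out = intervals_to_pitches_alt iset
instance (iset : List Int) (out : List Int) : Decidable (Spec_intervals_to_pitches iset out) := by unfold Spec_intervals_to_pitches; infer_instance

-- ===== CLAIM (what is proved, stated in full; the proofs are below) =====
def Claim_equal_intervals_to_pitches : Prop := ∀ (iset : List Int), Dom_intervals_to_pitches iset → Spec_intervals_to_pitches iset (intervals_to_pitches iset)

-- ===== LEMMAS AND PROOFS =====
theorem go_eq_prefix_sums (xs : List Int) : ∀ (p : Int),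
    p :: intervalsToPitchesGo p xs
      = (List.range (xs.length + 1)).map (fun i => p + (xs.take i).sum) := by
  induction xs with
  | nil => intro p; simp [intervalsToPitchesGo, List.range_succ]
  | cons j rest ih =>
    intro p
    rw [List.range_succ_eq_map]
    simp only [List.map_cons, List.map_map, List.take_zero, List.sum_nil, add_zero,
      List.length_cons, intervalsToPitchesGo]
    congr 1
    rw [ih (p + j)]
    apply List.map_congr_left
    intro i _
    simp [List.take_succ_cons, add_assoc]

-- ===== VERDICT (by name: the statement is the Claim_ definition above) =====
theorem intervals_to_pitches_spec : Claim_equal_intervals_to_pitches := by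
  intro iset _
  show intervals_to_pitches iset = intervals_to_pitches_alt iset
  have h := go_eq_prefix_sums iset 0
  simp only [zero_add] at h
  simpa [intervals_to_pitches, intervals_to_pitches_alt] using h
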